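-- pv_equiv track=rewrite | github.com/sustainable-computing-io/clever | recommender.py | get_consistent_max_val
-- ===== SOURCE A (Python) =====
-- def get_consistent_max_val(request_dict):
--     max_val = -1
--     consistent_cnt = 0
--     for pod in request_dict.keys():
--         for container in request_dict[pod].keys():
--             if request_dict[pod][container] > max_val:
--                 max_val = request_dict[pod][container]
--                 consistent_cnt += 1
--
--     is_consistent = True
--     if consistent_cnt > 1:
--         is_consistent = False
--
--     return is_consistent, max_val
-- ===== SOURCE B (Python) =====
-- def get_consistent_max_val(request_dict):
--     vals = [v for containers in request_dict.values() for v in containers.values()]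
--     max_val = max([-1, *vals])
--     first = next((v for v in vals if v > -1), None)
--     is_consistent = first is None or first == max_val
--     return is_consistent, max_val
-- ===== Notes on version B (the rewrite author's own statement) =====
-- stated objective: simpler
-- what changed: Instead of counting running-max updates in a nested loop, B flattens the values once, takes max with default -1, and decides consistency by checking that the first value strictly greater than -1 (if any) already equals the global max.
import Mathlib
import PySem

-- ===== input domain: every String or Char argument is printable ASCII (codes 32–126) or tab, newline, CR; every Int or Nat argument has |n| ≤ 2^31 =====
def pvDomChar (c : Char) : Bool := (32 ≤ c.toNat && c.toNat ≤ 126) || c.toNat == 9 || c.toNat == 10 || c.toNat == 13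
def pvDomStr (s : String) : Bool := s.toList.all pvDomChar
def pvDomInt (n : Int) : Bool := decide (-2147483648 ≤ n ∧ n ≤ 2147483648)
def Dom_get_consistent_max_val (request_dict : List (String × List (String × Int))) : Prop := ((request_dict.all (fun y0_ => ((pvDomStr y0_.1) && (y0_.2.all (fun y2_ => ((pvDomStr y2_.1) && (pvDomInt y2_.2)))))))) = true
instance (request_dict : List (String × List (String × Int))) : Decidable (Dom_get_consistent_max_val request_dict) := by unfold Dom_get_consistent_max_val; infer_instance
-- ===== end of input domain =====

-- B replaces A's nested running-max/update-count loop by a flat value list, a plain max with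
-- default -1, and a first-match test: the first value > -1 must already be the global max (objective: simpler).

-- ===== PORT A =====
-- the body of A's two nested loops: update (max_val, consistent_cnt) with one value
def pvStep (s : Int × Int) (v : Int) : Int × Int := if v > s.1 then (v, s.2 + 1) else s

def get_consistent_max_val (request_dict : List (String × List (String × Int))) : Bool × Int :=
  let st := request_dict.foldl
    (fun s pod => pod.2.foldl (fun s container => pvStep s container.2) s)
    ((-1 : Int), (0 : Int))
  let is_consistent := if st.2 > 1 then false else true
  (is_consistent, st.1)

-- ===== PORT B =====
def get_consistent_max_val_alt (request_dict : List (String × List (String × Int))) : Bool × Int :=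
  let vals := request_dict.flatMap (fun containers => containers.2.map (fun c => c.2))
  let max_val := vals.foldl max (-1 : Int)   -- max([-1, *vals])
  let is_consistent := match vals.find? (fun v => v > -1) with
    | none => true
    | some v => v == max_val
  (is_consistent, max_val)

-- ===== PRECONDITION & SPEC =====
-- Pre_ excludes association lists with a duplicated outer or inner key: such a list does not
-- represent any Python dict (dict construction would have collapsed the duplicates), so neither
-- program's Python behaviour is defined on it.
def Pre_get_consistent_max_val (request_dict : List (String × List (String × Int))) : Prop :=
  (request_dict.map Prod.fst).Nodup ∧ ∀ p ∈ request_dict, (p.2.map Prod.fst).Nodup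
instance (request_dict : List (String × List (String × Int))) : Decidable (Pre_get_consistent_max_val request_dict) := by unfold Pre_get_consistent_max_val; infer_instance
def pvWitness_get_consistent_max_val : (List (String × List (String × Int))) := [("p", [("c", 3), ("d", 2)]), ("q", [("c", 5)])]

def Spec_get_consistent_max_val (request_dict : List (String × List (String × Int))) (out : Bool × Int) : Prop := out = get_consistent_max_val_alt request_dict
instance (request_dict : List (String × List (String × Int))) (out : Bool × Int) : Decidable (Spec_get_consistent_max_val request_dict out) := by unfold Spec_get_consistent_max_val; infer_instance

-- ===== CLAIM (what is proved, stated in full; the proofs are below) =====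
def Claim_equal_get_consistent_max_val : Prop := ∀ (request_dict : List (String × List (String × Int))), Dom_get_consistent_max_val request_dict → Pre_get_consistent_max_val request_dict → Spec_get_consistent_max_val request_dict (get_consistent_max_val request_dict)

-- ===== LEMMAS AND PROOFS =====

-- A's nested fold is the flat fold of pvStep over B's flattened value list
theorem pv_fold_flat (rd : List (String × List (String × Int))) (s : Int × Int) :
    rd.foldl (fun s pod => pod.2.foldl (fun s container => pvStep s container.2) s) s
      = (rd.flatMap (fun containers => containers.2.map (fun c => c.2))).foldl pvStep s := by
  induction rd generalizing s with
  | nil => rfl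
  | cons p t ih =>
      simp only [List.foldl_cons, List.flatMap_cons, List.foldl_append, List.foldl_map]
      exact ih _

theorem pv_max_fix (l : List Int) (m : Int) : l.foldl max m = m ↔ ∀ x ∈ l, x ≤ m := by
  induction l generalizing m with
  | nil => simp
  | cons v t ih =>
      simp only [List.foldl_cons, List.mem_cons]
      by_cases h : v ≤ m
      · rw [max_eq_left h, ih]
        constructor
        · intro ha x hx; rcases hx with rfl | hx
          · exact h
          · exact ha x hx
        · intro ha x hx; exact ha x (Or.inr hx)
      · constructor
        · intro he
          have := (PySem.List.le_foldl_max t (max m v)).1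
          omega
        · intro ha
          exact absurd (ha v (Or.inl rfl)) h

theorem pv_fold_fst (l : List Int) (m c : Int) : (l.foldl pvStep (m, c)).1 = l.foldl max m := by
  induction l generalizing m c with
  | nil => rfl
  | cons v t ih =>
      simp only [List.foldl_cons, pvStep]
      by_cases h : v > m
      · simp only [if_pos h, ih, max_eq_right (le_of_lt h)]
      · simp only [if_neg h, ih, max_eq_left (not_lt.mp h)]

theorem pv_fold_snd_le (l : List Int) (m c : Int) : c ≤ (l.foldl pvStep (m, c)).2 := by
  induction l generalizing m c with
  | nil => exact le_refl c
  | cons v t ih =>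
      simp only [List.foldl_cons, pvStep]
      by_cases h : v > m
      · simp only [if_pos h]
        have := ih v (c + 1); omega
      · simp only [if_neg h]; exact ih m c

theorem pv_fold_snd_eq (l : List Int) (m c : Int) :
    (l.foldl pvStep (m, c)).2 = c ↔ ∀ x ∈ l, x ≤ m := by
  induction l generalizing m c with
  | nil => simp
  | cons v t ih =>
      simp only [List.foldl_cons, pvStep, List.mem_cons]
      by_cases h : v > m
      · simp only [if_pos h]
        constructor
        · intro he
          have := pv_fold_snd_le t v (c + 1)
          omega
        · intro ha
          exact absurd h (not_lt.mpr (ha v (Or.inl rfl)))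
      · simp only [if_neg h]
        rw [ih]
        constructor
        · intro ha x hx; rcases hx with rfl | hx
          · exact not_lt.mp h
          · exact ha x hx
        · intro ha x hx; exact ha x (Or.inr hx)

theorem pv_key (l : List Int) (m : Int) :
    ((l.foldl pvStep (m, 0)).2 ≤ 1) ↔ (∀ r ∈ l.find? (fun v => v > m), l.foldl max m = r) := by
  induction l generalizing m with
  | nil => simp
  | cons v t ih =>
      simp only [List.foldl_cons, List.find?_cons, pvStep, zero_add]
      by_cases h : v > m
      · simp only [if_pos h, decide_eq_true h, Option.mem_def, Option.some.injEq,
          forall_eq']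
        rw [max_eq_right (le_of_lt h)]
        have h1 := pv_fold_snd_le t v 1
        constructor
        · intro hle
          have he : (t.foldl pvStep (v, 1)).2 = 1 := by omega
          exact (pv_max_fix t v).mpr ((pv_fold_snd_eq t v 1).mp he)
        · intro hm
          have := (pv_fold_snd_eq t v 1).mpr ((pv_max_fix t v).mp hm)
          omega
      · simp only [if_neg h, decide_eq_false h, max_eq_left (not_lt.mp h)]
        exact ih m

-- ===== VERDICT (by name: the statement is the Claim_ definition above) =====
theorem get_consistent_max_val_spec : Claim_equal_get_consistent_max_val := by
  intro rd _ _
  show get_consistent_max_val rd = get_consistent_max_val_alt rd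
  unfold get_consistent_max_val get_consistent_max_val_alt
  rw [pv_fold_flat]
  set vals := rd.flatMap (fun containers => containers.2.map (fun c => c.2)) with hv
  refine Prod.ext ?_ (pv_fold_fst vals (-1) 0)
  have hkey := pv_key vals (-1)
  cases hf : vals.find? (fun v => v > -1) with
  | none =>
      simp only [hf, Option.mem_def] at hkey ⊢
      have : (vals.foldl pvStep (-1, 0)).2 ≤ 1 := hkey.mpr (by intro r hr; cases hr)
      simp only [if_neg (by omega : ¬ (vals.foldl pvStep (-1, 0)).2 > 1)]
  | some r =>
      simp only [hf, Option.mem_def, Option.some.injEq, forall_eq'] at hkey ⊢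
      by_cases hc : (vals.foldl pvStep (-1, 0)).2 > 1
      · have hne : ¬ vals.foldl max (-1) = r := fun hmr => absurd (hkey.mpr hmr) (by omega)
        simp only [if_pos hc]
        symm
        exact beq_eq_false_iff_ne.mpr (fun h => hne h.symm)
      · have heq : vals.foldl max (-1) = r := hkey.mp (by omega)
        simp [if_neg hc, heq]
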